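/- GENERATED by farm/mkstatement.py from design/units.tsv (unit `DGifDecompressInput.COMPOSITION`) and the Specs of Gif/Spec/*.lean — do not edit.
   THE STATEMENT of the proof unit `DGifDecompressInput.COMPOSITION`: the function `DGifDecompressInput` (105 instructions) satisfies its contract,
   GIVEN THE STATEMENTS OF ITS 5 SEGMENTS (`Gif.Spec.DGifDecompressInput.Seg<k> Lay μ u₀`: what the unit `DGifDecompressInput.<k>` proves).
   No machine code is walked: `ReachVia.trans` along the segments (the exit assertion of a segment is the entry assertion of
   its successor), an induction on the loop measures. What the names mean: ProgX/Base/Spec/Basic.lean. The theorem to prove: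
   `theorem DGifDecompressInput_COMPOSITION_ok : Gif.Spec.DGifDecompressInput_COMPOSITION.Statement`. -/
import Gif.Code
import Gif.Dec.All
import Gif.Labels
import Gif.Spec.Lzw
import Gif.Spec.Seg_DGifDecompressInput
namespace Gif.Spec.DGifDecompressInput_COMPOSITION
open X86 X86.User Asan

/-- The statement of unit `DGifDecompressInput.COMPOSITION`. -/
def Statement : Prop :=
  ∀ (Lay : Layout) (_hLay : Lay.hi = 0x1000000) (μ : Microarch) (_hμ : UserX.MicroOK μ) (u₀ : State)
    (_h_DGifDecompressInput_P : Gif.Spec.DGifDecompressInput.SegP Lay μ u₀)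
    (_h_DGifDecompressInput_1 : Gif.Spec.DGifDecompressInput.Seg1 Lay μ u₀)
    (_h_DGifDecompressInput_2 : Gif.Spec.DGifDecompressInput.Seg2 Lay μ u₀)
    (_h_DGifDecompressInput_3 : Gif.Spec.DGifDecompressInput.Seg3 Lay μ u₀)
    (_h_DGifDecompressInput_E : Gif.Spec.DGifDecompressInput.SegE Lay μ u₀),
    ∀ (H : Heap) (rest : List Obj) (frames : List (Nat × FrameLayout)) (F : Forest) (R : Rd), Calls Lay μ ProgX.Base.WayInv (ProgX.Base.conv u₀) Gif.L.DGifDecompressInput.entry (Gif.Spec.DGifDecompressInput.spec H rest frames F R)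

end Gif.Spec.DGifDecompressInput_COMPOSITION
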